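-- pv_equiv track=rewrite | github.com/ConorSheehan1/advent_of_code_2017 | day09/main.py | remove_escaped_data
-- ===== SOURCE A (Python) =====
-- def remove_escaped_data(data):
--     copy = ""
--     skip = 0
--     for char in data:
--         if char == "!" and skip == 0:
--             skip = 2
--         if skip > 0:
--             skip -= 1
--             continue
--         if char != "!" and skip == 0:
--             copy += char
--     return copy
-- ===== SOURCE B (Python) =====
-- import re
--
-- def remove_escaped_data(data):
--     # Delete every '!' together with the (optional) character following it,
--     # in one left-to-right regex pass (DOTALL so newlines count as characters).
--     return re.sub(r'!.?', '', data, flags=re.DOTALL)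
-- ===== Notes on version B (the rewrite author's own statement) =====
-- stated objective: idiomatic
-- what changed: Replaced the manual character scan with a skip counter by a single regex substitution (DOTALL) that deletes each exclamation mark together with its optional following character.
import Mathlib
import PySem

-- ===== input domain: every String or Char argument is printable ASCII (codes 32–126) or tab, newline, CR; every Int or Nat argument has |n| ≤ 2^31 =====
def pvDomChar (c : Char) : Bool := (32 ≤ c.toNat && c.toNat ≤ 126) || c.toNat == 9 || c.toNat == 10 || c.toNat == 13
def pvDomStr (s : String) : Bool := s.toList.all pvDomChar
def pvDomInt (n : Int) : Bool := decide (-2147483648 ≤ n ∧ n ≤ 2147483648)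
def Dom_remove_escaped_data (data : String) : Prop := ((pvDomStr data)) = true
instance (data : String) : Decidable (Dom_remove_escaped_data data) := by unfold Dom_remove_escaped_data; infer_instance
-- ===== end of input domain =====

-- B replaces A's manual scan with a skip counter by one regex pass (re.sub(r'!.?','')):
-- delete each '!' together with its optional following character; objective: idiomatic.

-- ===== PORT A =====
-- the for-loop over the characters of `data`, carrying the mutable state (copy, skip)
def removeEscapedGoA : List Char → String → Int → String
  | [], copy, _ => copy
  | c :: rest, copy, skip =>
    let skip' := if c = '!' ∧ skip = 0 then 2 else skip
    if skip' > 0 then removeEscapedGoA rest copy (skip' - 1)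
    else if c ≠ '!' ∧ skip' = 0 then removeEscapedGoA rest (copy.push c) skip'
    else removeEscapedGoA rest copy skip'

def remove_escaped_data (data : String) : String := removeEscapedGoA data.toList "" 0

-- ===== PORT B =====
-- hand port of re.sub(r'!.?', '', data, flags=re.DOTALL): exact for this pattern —
-- scanning left to right, each '!' is deleted together with the next character (if any),
-- every other character is kept.
def removeEscapedGoB : List Char → List Char
  | [] => []
  | ['!'] => []
  | '!' :: _ :: rest => removeEscapedGoB rest
  | c :: rest => c :: removeEscapedGoB rest

def remove_escaped_data_alt (data : String) : String := String.ofList (removeEscapedGoB data.toList)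

-- ===== PRECONDITION & SPEC =====
def Spec_remove_escaped_data (data : String) (out : String) : Prop := out = remove_escaped_data_alt data
instance (data : String) (out : String) : Decidable (Spec_remove_escaped_data data out) := by unfold Spec_remove_escaped_data; infer_instance

-- ===== CLAIM (what is proved, stated in full; the proofs are below) =====
def Claim_equal_remove_escaped_data : Prop := ∀ (data : String), Dom_remove_escaped_data data → Spec_remove_escaped_data data (remove_escaped_data data)

-- ===== LEMMAS AND PROOFS =====

theorem push_mk (s : String) (c : Char) (l : List Char) :
    (s.push c) ++ String.ofList l = s ++ String.ofList (c :: l) := by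
  apply String.ext
  simp

theorem goA_eq_goB (l : List Char) : ∀ (copy : String),
    removeEscapedGoA l copy 0 = copy ++ String.ofList (removeEscapedGoB l) := by
  induction l using removeEscapedGoB.induct with
  | case1 =>
      intro copy
      simp only [removeEscapedGoA, removeEscapedGoB]
      apply String.ext; simp
  | case2 =>
      intro copy
      simp only [removeEscapedGoA, removeEscapedGoB]
      norm_num [removeEscapedGoA]
  | case3 c rest ih =>
      intro copy
      simp only [removeEscapedGoA, removeEscapedGoB]
      norm_num [removeEscapedGoA, ih]
  | case4 c rest h1 h2 ih =>
      intro copy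
      have hc : c ≠ '!' := by
        intro h
        cases rest with
        | nil => exact h1 h rfl
        | cons a t => exact h2 a t h rfl
      simp only [removeEscapedGoA, removeEscapedGoB]
      simp [hc, ih, push_mk]

-- ===== VERDICT (by name: the statement is the Claim_ definition above) =====
theorem remove_escaped_data_spec : Claim_equal_remove_escaped_data := by
  intro data _
  unfold Spec_remove_escaped_data remove_escaped_data remove_escaped_data_alt
  rw [goA_eq_goB]
  apply String.ext
  simp
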